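-- pv_equiv track=rewrite | github.com/ffuuugor/deepHackTuring | src/deephack/features/common.py | split_by_phrases
-- ===== SOURCE A (Python) =====
-- def split_by_phrases(tokens):
--     res = []
--     curr_phrase = []
--     for token in tokens:
--         if token.endswith("speaker>"):
--             if curr_phrase:
--                 res.append(curr_phrase)
--                 curr_phrase = []
--         else:
--             curr_phrase.append(token)
--
--     if curr_phrase:
--         res.append(curr_phrase)
--
--     return res
-- ===== SOURCE B (Python) =====
-- def split_by_phrases(tokens):
--     bounds = [-1] + [i for i, t in enumerate(tokens) if t.endswith("speaker>")] + [len(tokens)]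
--     return [tokens[a + 1:b] for a, b in zip(bounds, bounds[1:]) if b - a > 1]
-- ===== Notes on version B (the rewrite author's own statement) =====
-- stated objective: alternative
-- what changed: Instead of a single pass with a running phrase accumulator, B first computes the list of speaker-token indices (boundaries) and then slices the token list between consecutive boundaries, keeping the non-empty slices.
import Mathlib
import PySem

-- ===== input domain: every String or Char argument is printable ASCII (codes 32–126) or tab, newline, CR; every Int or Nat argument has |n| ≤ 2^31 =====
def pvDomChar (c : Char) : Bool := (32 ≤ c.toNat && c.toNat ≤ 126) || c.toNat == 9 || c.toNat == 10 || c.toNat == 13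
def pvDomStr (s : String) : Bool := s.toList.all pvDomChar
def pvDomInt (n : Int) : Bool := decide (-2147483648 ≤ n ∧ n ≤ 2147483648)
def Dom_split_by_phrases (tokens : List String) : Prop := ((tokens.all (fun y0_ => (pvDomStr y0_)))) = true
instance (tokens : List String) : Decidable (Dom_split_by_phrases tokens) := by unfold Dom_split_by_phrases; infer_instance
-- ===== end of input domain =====

-- B replaces A's single pass with a running phrase accumulator by two staged passes:
-- first the list of speaker-token indices (boundaries), then slicing between consecutive boundaries.
-- ===== PORT A =====
def split_by_phrases (tokens : List String) : List (List String) :=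
  let st := tokens.foldl (fun (s : List (List String) × List String) token =>
      if PySem.Str.endswith token "speaker>" then
        if s.2 ≠ [] then (s.1 ++ [s.2], []) else s
      else
        (s.1, s.2 ++ [token])) ([], [])
  if st.2 ≠ [] then st.1 ++ [st.2] else st.1

-- ===== PORT B =====
-- bounds = [-1] + speaker indices + [len(tokens)]; phrases = the non-trivial slices between consecutive bounds.
def split_by_phrases_alt (tokens : List String) : List (List String) :=
  let bounds : List Int :=
    [-1] ++ ((PySem.List.enumerate tokens).filterMap
      (fun p => if PySem.Str.endswith p.2 "speaker>" then some p.1 else none)) ++ [(tokens.length : Int)]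
  (bounds.zip bounds.tail).filterMap
    (fun p => if p.2 - p.1 > 1 then some (PySem.List.slice tokens (some (p.1 + 1)) (some p.2)) else none)

-- ===== PRECONDITION & SPEC =====
def Spec_split_by_phrases (tokens : List String) (out : List (List String)) : Prop := out = split_by_phrases_alt tokens
instance (tokens : List String) (out : List (List String)) : Decidable (Spec_split_by_phrases tokens out) := by unfold Spec_split_by_phrases; infer_instance

-- ===== CLAIM (what is proved, stated in full; the proofs are below) =====
def Claim_equal_split_by_phrases : Prop := ∀ (tokens : List String), Dom_split_by_phrases tokens → Spec_split_by_phrases tokens (split_by_phrases tokens)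

-- ===== LEMMAS AND PROOFS =====

-- the speaker test, as it appears after simp-normalising String.endswith
def pvSpk (t : String) : Bool := PySem.Str.endswith t "speaker>"

-- common reference recursion: phrases as maximal runs of non-speaker tokens
def pvSplit : List String → List (List String)
  | [] => []
  | t :: ts =>
    if pvSpk t then pvSplit ts
    else (t :: ts.takeWhile (fun x => !pvSpk x)) :: pvSplit (ts.dropWhile (fun x => !pvSpk x))
termination_by ts => ts.length
decreasing_by
  · simp
  · exact Nat.lt_of_le_of_lt (List.length_dropWhile_le _ _) (by simp)

-- ---------- A-side: the fold equals pvSplit ----------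

def pvRun : List String → List String → List (List String)
  | [], curr => if curr ≠ [] then [curr] else []
  | t :: ts, curr =>
    if pvSpk t then
      if curr ≠ [] then curr :: pvRun ts [] else pvRun ts []
    else pvRun ts (curr ++ [t])

lemma pvA_eq_run (ts : List String) : ∀ res curr,
    (let st := ts.foldl (fun (s : List (List String) × List String) token =>
        if PySem.Str.endswith token "speaker>" then
          if s.2 ≠ [] then (s.1 ++ [s.2], []) else s
        else
          (s.1, s.2 ++ [token])) (res, curr)
     if st.2 ≠ [] then st.1 ++ [st.2] else st.1) = res ++ pvRun ts curr := by
  induction ts with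
  | nil =>
    intro res curr
    simp only [List.foldl_nil, pvRun]
    by_cases h : curr = [] <;> simp [h]
  | cons t ts ih =>
    intro res curr
    simp at ih
    by_cases hs : pvSpk t <;>
      by_cases hc : curr = [] <;>
      simp [List.foldl_cons, pvRun, pvSpk, hs, hc, ih, List.append_assoc] <;>
      simp [pvSpk] at hs <;> simp [hs]

lemma pvRun_eq_split (ts : List String) : ∀ curr,
    pvRun ts curr =
      if curr = [] then pvSplit ts
      else (curr ++ ts.takeWhile (fun x => !pvSpk x)) :: pvSplit (ts.dropWhile (fun x => !pvSpk x)) := by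
  induction ts with
  | nil =>
    intro curr
    by_cases h : curr = [] <;> simp [pvRun, pvSplit, h]
  | cons t ts ih =>
    intro curr
    by_cases hs : pvSpk t
    · have hsp : pvSplit (t :: ts) = pvSplit ts := by rw [pvSplit]; simp [hs]
      by_cases hc : curr = [] <;> simp [pvRun, hs, hc, ih, hsp, List.takeWhile_cons, List.dropWhile_cons]
    · have hsp : pvSplit (t :: ts) =
          (t :: ts.takeWhile (fun x => !pvSpk x)) :: pvSplit (ts.dropWhile (fun x => !pvSpk x)) := by
        rw [pvSplit]; simp [hs]
      by_cases hc : curr = [] <;>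
        simp [pvRun, hs, hc, ih, hsp, List.takeWhile_cons, List.dropWhile_cons, List.append_assoc]

-- ---------- B-side: boundary/slice machinery ----------

def pvIdx (xs : List String) (s : Int) : List Int :=
  (PySem.List.enumerate xs s).filterMap (fun p => if pvSpk p.2 then some p.1 else none)

def pvN (xs : List String) : List Int := pvIdx xs 0 ++ [(xs.length : Int)]

def pvSeg (xs : List String) (bs : List Int) : List (List String) :=
  (bs.zip bs.tail).filterMap
    (fun p => if p.2 - p.1 > 1 then some (PySem.List.slice xs (some (p.1 + 1)) (some p.2)) else none)

lemma pvB_eq_seg (xs : List String) : split_by_phrases_alt xs = pvSeg xs (-1 :: pvN xs) := by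
  simp only [split_by_phrases_alt, pvSeg, pvN, pvIdx, pvSpk]
  rfl

lemma pvIdx_nil (s : Int) : pvIdx [] s = [] := by simp [pvIdx, PySem.List.enumerate_nil]

lemma pvIdx_cons (x : String) (xs : List String) (s : Int) :
    pvIdx (x :: xs) s = (if pvSpk x then [s] else []) ++ pvIdx xs (s + 1) := by
  simp [pvIdx, PySem.List.enumerate_cons]
  by_cases h : pvSpk x <;> simp [h]

lemma pvIdx_shift (xs : List String) : ∀ s : Int, pvIdx xs (s + 1) = (pvIdx xs s).map (· + 1) := by
  induction xs with
  | nil => intro s; simp [pvIdx_nil]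
  | cons x xs ih =>
    intro s
    rw [pvIdx_cons, pvIdx_cons]
    by_cases h : pvSpk x <;> simp [h, ih (s + 1)]

lemma pvIdx_ge (xs : List String) : ∀ (s b : Int), b ∈ pvIdx xs s → s ≤ b := by
  induction xs with
  | nil => intro s b h; simp [pvIdx_nil] at h
  | cons x xs ih =>
    intro s b h
    rw [pvIdx_cons] at h
    rcases List.mem_append.1 h with h1 | h2
    · by_cases hx : pvSpk x <;> simp [hx] at h1; omega
    · have := ih (s + 1) b h2; omega

lemma pvN_ne_nil (xs : List String) : pvN xs ≠ [] := by simp [pvN]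

lemma pvN_nonneg (xs : List String) : ∀ b ∈ pvN xs, 0 ≤ b := by
  intro b hb
  rcases List.mem_append.1 hb with h | h
  · exact pvIdx_ge xs 0 b h
  · simp at h; omega

lemma pvIdx_one (xs : List String) : pvIdx xs 1 = (pvIdx xs 0).map (· + 1) := by
  have h := pvIdx_shift xs 0
  norm_num at h
  exact h

lemma pvN_cons_spk (t : String) (xs : List String) (h : pvSpk t = true) :
    pvN (t :: xs) = 0 :: (pvN xs).map (· + 1) := by
  simp only [pvN, pvIdx_cons, h, if_pos, pvIdx_one, List.map_append, List.map_cons,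
    List.map_nil, List.length_cons, List.cons_append, List.nil_append]
  push_cast
  rw [pvIdx_one]

lemma pvN_cons_nonspk (t : String) (xs : List String) (h : pvSpk t = false) :
    pvN (t :: xs) = (pvN xs).map (· + 1) := by
  simp only [pvN, pvIdx_cons, h, Bool.false_eq_true, if_false, pvIdx_one, List.map_append,
    List.map_cons, List.map_nil, List.length_cons, List.nil_append]
  push_cast
  rw [pvIdx_one]

lemma slice_cons_succ (t : String) (xs : List String) (a b : Int) (ha : 0 ≤ a) (hb : 0 ≤ b) :
    PySem.List.slice (t :: xs) (some (a + 1)) (some (b + 1)) = PySem.List.slice xs (some a) (some b) := by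
  obtain ⟨m, rfl⟩ := Int.eq_ofNat_of_zero_le ha
  obtain ⟨k, rfl⟩ := Int.eq_ofNat_of_zero_le hb
  have h1 : ((m : Int) + 1) = ((m + 1 : Nat) : Int) := by push_cast; ring
  have h2 : ((k : Int) + 1) = ((k + 1 : Nat) : Int) := by push_cast; ring
  rw [h1, h2, PySem.List.slice_natCast, PySem.List.slice_natCast]
  simp [Nat.succ_sub_succ]

lemma pvSeg_cons2 (xs : List String) (a b : Int) (bs : List Int) :
    pvSeg xs (a :: b :: bs) =
      (if b - a > 1 then [PySem.List.slice xs (some (a + 1)) (some b)] else []) ++ pvSeg xs (b :: bs) := by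
  simp only [pvSeg, List.tail_cons, List.zip_cons_cons, List.filterMap_cons]
  by_cases h : b - a > 1 <;> simp [h]

lemma pvSeg_shift (t : String) (xs : List String) (bs : List Int) (h : ∀ b ∈ bs, -1 ≤ b) :
    pvSeg (t :: xs) (bs.map (· + 1)) = pvSeg xs bs := by
  unfold pvSeg
  rw [show (bs.map (· + 1)).tail = bs.tail.map (· + 1) by cases bs <;> simp,
      List.zip_map]
  rw [List.filterMap_map]
  apply List.filterMap_congr
  intro p hp
  have hmem := List.of_mem_zip hp
  have ha : -1 ≤ p.1 := h _ hmem.1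
  have hb : -1 ≤ p.2 := h _ (List.mem_of_mem_tail hmem.2)
  simp only [Function.comp, Prod.map]
  by_cases hc : p.2 - p.1 > 1
  · have hc' : p.2 + 1 - (p.1 + 1) > 1 := by omega
    simp only [hc, hc', if_pos]
    rw [show p.1 + 1 + 1 = (p.1 + 1) + 1 by ring,
        slice_cons_succ t xs (p.1 + 1) p.2 (by omega) (by omega)]
  · have hc' : ¬ (p.2 + 1 - (p.1 + 1) > 1) := by omega
    simp [hc]

lemma pvB_cons_spk (t : String) (ts : List String) (h : pvSpk t = true) :
    split_by_phrases_alt (t :: ts) = split_by_phrases_alt ts := by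
  rw [pvB_eq_seg, pvB_eq_seg, pvN_cons_spk t ts h, pvSeg_cons2]
  norm_num
  rw [show (0 : Int) :: (pvN ts).map (· + 1) = ((-1) :: pvN ts).map (· + 1) by simp]
  apply pvSeg_shift
  intro b hb
  rcases List.mem_cons.1 hb with rfl | hb'
  · omega
  · have := pvN_nonneg ts b hb'; omega

lemma pvB_cons_nonspk (t : String) (ts : List String) (h : pvSpk t = false) :
    split_by_phrases_alt (t :: ts) =
      (t :: PySem.List.slice ts (some 0) (some (pvN ts).headI)) :: pvSeg ts (pvN ts) := by
  rw [pvB_eq_seg, pvN_cons_nonspk t ts h]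
  obtain ⟨c, R, hcr⟩ : ∃ c R, pvN ts = c :: R := by
    cases hx : pvN ts with
    | nil => exact absurd hx (pvN_ne_nil ts)
    | cons c R => exact ⟨c, R, rfl⟩
  have hc0 : 0 ≤ c := pvN_nonneg ts c (by rw [hcr]; exact List.mem_cons_self ..)
  rw [hcr]
  simp only [List.map_cons]
  rw [pvSeg_cons2]
  have hgt : c + 1 - (-1) > 1 := by omega
  simp only [hgt, if_pos]
  have hshift : pvSeg (t :: ts) ((c + 1) :: R.map (· + 1)) = pvSeg ts (c :: R) := by
    rw [show (c + 1) :: R.map (· + 1) = (c :: R).map (· + 1) by simp]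
    apply pvSeg_shift
    intro b hb
    have : b ∈ pvN ts := by rw [hcr]; exact hb
    have := pvN_nonneg ts b this; omega
  rw [hshift]
  have hhead : PySem.List.slice (t :: ts) (some (-1 + 1)) (some (c + 1)) =
      t :: PySem.List.slice ts (some 0) (some c) := by
    obtain ⟨k, rfl⟩ := Int.eq_ofNat_of_zero_le hc0
    have h2 : ((k : Int) + 1) = ((k + 1 : Nat) : Int) := by push_cast; ring
    have h0 : ((-1 : Int) + 1) = ((0 : Nat) : Int) := by norm_num
    have h0' : (0 : Int) = ((0 : Nat) : Int) := rfl
    rw [h2, h0, h0', PySem.List.slice_natCast, PySem.List.slice_natCast]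
    simp [List.take_succ_cons]
  simp only [List.headI]
  rw [← hhead]
  simp

-- first slice = takeWhile, remaining segments = B of dropWhile
lemma pvSlice_head_takeWhile (xs : List String) :
    PySem.List.slice xs (some 0) (some (pvN xs).headI) = xs.takeWhile (fun x => !pvSpk x) := by
  induction xs with
  | nil =>
    simp only [pvN, pvIdx_nil, List.nil_append, List.headI, List.takeWhile_nil]
    rw [show (0 : Int) = ((0 : Nat) : Int) from rfl, PySem.List.slice_natCast]
    simp
  | cons u us ih =>
    by_cases hu : pvSpk u
    · rw [pvN_cons_spk u us hu]
      simp only [List.headI, List.takeWhile_cons, hu, Bool.not_true]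
      rw [show (0 : Int) = ((0 : Nat) : Int) from rfl, PySem.List.slice_natCast]
      simp
    · rw [pvN_cons_nonspk u us (by simp [hu])]
      obtain ⟨c, R, hcr⟩ : ∃ c R, pvN us = c :: R := by
        cases hx : pvN us with
        | nil => exact absurd hx (pvN_ne_nil us)
        | cons c R => exact ⟨c, R, rfl⟩
      have hc0 : 0 ≤ c := pvN_nonneg us c (by rw [hcr]; exact List.mem_cons_self ..)
      rw [hcr] at ih ⊢
      simp only [List.map_cons, List.headI] at ih ⊢
      obtain ⟨k, rfl⟩ := Int.eq_ofNat_of_zero_le hc0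
      have h2 : ((k : Int) + 1) = ((k + 1 : Nat) : Int) := by push_cast; ring
      rw [h2]
      simp only [PySem.List.slice_zero_start, PySem.List.slice_to_natCast] at ih ⊢
      simp [hu, List.take_succ_cons, ih]

lemma pvSeg_eq_B_dropWhile (xs : List String) :
    pvSeg xs (pvN xs) = split_by_phrases_alt (xs.dropWhile (fun x => !pvSpk x)) := by
  induction xs with
  | nil => simp [pvN, pvIdx_nil, pvSeg, split_by_phrases_alt, PySem.List.enumerate_nil]
  | cons u us ih =>
    by_cases hu : pvSpk u
    · rw [List.dropWhile_cons]
      simp only [hu, Bool.not_true, Bool.false_eq_true, if_false]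
      rw [pvB_eq_seg, pvN_cons_spk u us hu, pvSeg_cons2]
      norm_num
    · rw [List.dropWhile_cons]
      simp only [hu, Bool.not_false, if_true]
      rw [pvN_cons_nonspk u us (by simp [hu])]
      rw [pvSeg_shift u us (pvN us) (fun b hb => by have := pvN_nonneg us b hb; omega)]
      exact ih

lemma pvB_nil : split_by_phrases_alt [] = [] := by
  simp [split_by_phrases_alt, PySem.List.enumerate_nil]

lemma pvB_eq_split : ∀ (n : Nat) (xs : List String), xs.length ≤ n → split_by_phrases_alt xs = pvSplit xs := by
  intro n
  induction n with
  | zero =>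
    intro xs h
    have hx : xs = [] := List.eq_nil_of_length_eq_zero (Nat.le_zero.1 h)
    subst hx
    rw [pvB_nil, pvSplit]
  | succ n ih =>
    intro xs h
    cases xs with
    | nil => rw [pvB_nil, pvSplit]
    | cons t ts =>
      by_cases ht : pvSpk t
      · rw [pvB_cons_spk t ts ht, ih ts (by simpa using Nat.le_of_succ_le_succ h)]
        rw [pvSplit]; simp [ht]
      · rw [pvB_cons_nonspk t ts (by simpa using ht)]
        rw [pvSlice_head_takeWhile, pvSeg_eq_B_dropWhile]
        rw [ih (ts.dropWhile (fun x => !pvSpk x))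
              (le_trans (List.length_dropWhile_le _ _) (by simp at h; omega))]
        rw [pvSplit]; simp [ht]

-- ===== VERDICT (by name: the statement is the Claim_ definition above) =====
theorem split_by_phrases_spec : Claim_equal_split_by_phrases := by
  intro tokens _
  unfold Spec_split_by_phrases split_by_phrases
  have h := pvA_eq_run tokens [] []
  simp only [h, List.nil_append, pvRun_eq_split tokens []]
  exact (pvB_eq_split tokens.length tokens le_rfl).symm
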